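-- pv_equiv track=rewrite | github.com/vinuvargheseijk/paper_codes | source_codes_Fig5/makeNewSpine.py | contiguous_chunk
-- ===== SOURCE A (Python) =====
-- def contiguous_chunk(list_item):
--     """
--     This is the function that looks for contiguous chunks of voxels
--     that has non zero membrane molecules.
--     list_item has the nonzero membrane voxels of the dendrite
--     """
--     contiguous_vecs = []
--     temp_vec = []
--     augmented_list = list_item + [0]
--     for i in range(len(list_item)):
--         if (augmented_list[i + 1] == augmented_list[i] + 1):
--             temp_vec.append(augmented_list[i])
--         else:
--             temp_vec.append(augmented_list[i])
--             contiguous_vecs.append(temp_vec)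
--             temp_vec = []
--     return contiguous_vecs
-- ===== SOURCE B (Python) =====
-- def contiguous_chunk(list_item):
--     # Two-phase: collect break indices first, then slice the chunks out.
--     augmented_list = list_item + [0]
--     breaks = [i for i in range(len(list_item))
--               if augmented_list[i + 1] != augmented_list[i] + 1]
--     contiguous_vecs = []
--     prev = -1
--     for b in breaks:
--         contiguous_vecs.append(list_item[prev + 1:b + 1])
--         prev = b
--     return contiguous_vecs
-- ===== Notes on version B (the rewrite author's own statement) =====
-- stated objective: alternative
-- what changed: A builds chunks in one pass with a growing temp_vec accumulator; B first collects the list of break indices with a comprehension and then emits each chunk as a slice between consecutive breaks (the trailing unclosed run after the last break is naturally never sliced out).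
import Mathlib
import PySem

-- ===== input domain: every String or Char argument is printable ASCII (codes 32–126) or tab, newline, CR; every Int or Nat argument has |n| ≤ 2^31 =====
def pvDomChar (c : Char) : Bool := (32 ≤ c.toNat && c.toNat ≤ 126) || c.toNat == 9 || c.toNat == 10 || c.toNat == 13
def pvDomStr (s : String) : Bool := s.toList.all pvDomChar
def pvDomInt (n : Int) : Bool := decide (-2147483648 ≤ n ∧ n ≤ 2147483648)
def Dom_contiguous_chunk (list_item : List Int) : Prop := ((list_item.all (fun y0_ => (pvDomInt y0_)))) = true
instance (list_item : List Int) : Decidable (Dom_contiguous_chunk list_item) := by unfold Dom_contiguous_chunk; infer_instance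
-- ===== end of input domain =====

-- B re-decomposes A's single accumulating loop into two phases (collect break indices, then slice the
-- chunks between consecutive breaks); same cost, objective: alternative decomposition.

-- ===== PORT A =====
def contiguous_chunk (list_item : List Int) : List (List Int) :=
  let augmented_list := list_item ++ [0]
  let st := (PySem.List.pyRange 0 (list_item.length : Int) 1).foldl
    (fun (s : List (List Int) × List Int) i =>
      if PySem.List.pyGetD augmented_list (i + 1) 0 = PySem.List.pyGetD augmented_list i 0 + 1 then
        (s.1, s.2 ++ [PySem.List.pyGetD augmented_list i 0])
      else
        (s.1 ++ [s.2 ++ [PySem.List.pyGetD augmented_list i 0]], []))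
    ([], [])
  st.1

-- ===== PORT B =====
def contiguous_chunk_alt (list_item : List Int) : List (List Int) :=
  let augmented_list := list_item ++ [0]
  let breaks := (PySem.List.pyRange 0 (list_item.length : Int) 1).filter
    (fun i => PySem.List.pyGetD augmented_list (i + 1) 0 ≠ PySem.List.pyGetD augmented_list i 0 + 1)
  let st := breaks.foldl
    (fun (s : List (List Int) × Int) b =>
      (s.1 ++ [PySem.List.slice list_item (some (s.2 + 1)) (some (b + 1))], b))
    ([], -1)
  st.1

-- ===== PRECONDITION & SPEC =====
def Spec_contiguous_chunk (list_item : List Int) (out : List (List Int)) : Prop := out = contiguous_chunk_alt list_item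
instance (list_item : List Int) (out : List (List Int)) : Decidable (Spec_contiguous_chunk list_item out) := by unfold Spec_contiguous_chunk; infer_instance

-- ===== CLAIM (what is proved, stated in full; the proofs are below) =====
def Claim_equal_contiguous_chunk : Prop := ∀ (list_item : List Int), Dom_contiguous_chunk list_item → Spec_contiguous_chunk list_item (contiguous_chunk list_item)

-- ===== LEMMAS AND PROOFS =====

-- A's loop state after the first k iterations
def ccA (l : List Int) (k : Nat) : List (List Int) × List Int :=
  (PySem.List.pyRange 0 (k : Int) 1).foldl
    (fun (s : List (List Int) × List Int) i =>
      if PySem.List.pyGetD (l ++ [0]) (i + 1) 0 = PySem.List.pyGetD (l ++ [0]) i 0 + 1 then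
        (s.1, s.2 ++ [PySem.List.pyGetD (l ++ [0]) i 0])
      else
        (s.1 ++ [s.2 ++ [PySem.List.pyGetD (l ++ [0]) i 0]], []))
    ([], [])

-- B's loop state after folding the breaks of the first k indices
def ccB (l : List Int) (k : Nat) : List (List Int) × Int :=
  ((PySem.List.pyRange 0 (k : Int) 1).filter
    (fun i => PySem.List.pyGetD (l ++ [0]) (i + 1) 0 ≠ PySem.List.pyGetD (l ++ [0]) i 0 + 1)).foldl
    (fun (s : List (List Int) × Int) b =>
      (s.1 ++ [PySem.List.slice l (some (s.2 + 1)) (some (b + 1))], b))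
    ([], -1)

lemma contiguous_chunk_eq_ccA (l : List Int) : contiguous_chunk l = (ccA l l.length).1 := rfl

lemma contiguous_chunk_alt_eq_ccB (l : List Int) : contiguous_chunk_alt l = (ccB l l.length).1 := rfl

lemma ccA_succ (l : List Int) (k : Nat) :
    ccA l (k + 1) =
      (let s := ccA l k
       if PySem.List.pyGetD (l ++ [0]) ((k : Int) + 1) 0 = PySem.List.pyGetD (l ++ [0]) (k : Int) 0 + 1 then
         (s.1, s.2 ++ [PySem.List.pyGetD (l ++ [0]) (k : Int) 0])
       else
         (s.1 ++ [s.2 ++ [PySem.List.pyGetD (l ++ [0]) (k : Int) 0]], [])) := by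
  unfold ccA
  rw [show ((k + 1 : Nat) : Int) = (k : Int) + 1 by push_cast; ring,
      PySem.List.pyRange_one_succ_right (by positivity), List.foldl_append]
  simp

lemma ccB_succ (l : List Int) (k : Nat) :
    ccB l (k + 1) =
      (if PySem.List.pyGetD (l ++ [0]) ((k : Int) + 1) 0 = PySem.List.pyGetD (l ++ [0]) (k : Int) 0 + 1 then
         ccB l k
       else
         ((ccB l k).1 ++ [PySem.List.slice l (some ((ccB l k).2 + 1)) (some ((k : Int) + 1))], (k : Int))) := by
  unfold ccB
  rw [show ((k + 1 : Nat) : Int) = (k : Int) + 1 by push_cast; ring,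
      PySem.List.pyRange_one_succ_right (by positivity), List.filter_append]
  by_cases h : PySem.List.pyGetD (l ++ [0]) ((k : Int) + 1) 0 = PySem.List.pyGetD (l ++ [0]) (k : Int) 0 + 1
  · rw [if_pos h]; simp [h]
  · rw [if_neg h]
    rw [show List.filter
          (fun i => decide (PySem.List.pyGetD (l ++ [0]) (i + 1) 0 ≠ PySem.List.pyGetD (l ++ [0]) i 0 + 1))
          [(k : Int)] = [(k : Int)] from
            List.filter_eq_self.mpr (by
              intro x hx
              rw [List.mem_singleton] at hx
              subst hx
              exact decide_eq_true h),
        List.foldl_append]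
    rfl

lemma aug_getD (l : List Int) (k : Nat) (hk : k < l.length) :
    PySem.List.pyGetD (l ++ [0]) (k : Int) 0 = l[k] := by
  rw [PySem.List.pyGetD_natCast]
  simp [List.getD, List.getElem?_append_left hk, hk]

lemma take_drop_snoc (l : List Int) (p k : Nat) (hp : p ≤ k) (hk : k < l.length) :
    (l.drop p).take (k - p) ++ [l[k]] = (l.drop p).take (k + 1 - p) := by
  have h1 : k + 1 - p = (k - p) + 1 := by omega
  have h2 : (l.drop p)[k - p]? = some l[k] := by
    rw [List.getElem?_drop]
    have : p + (k - p) = k := by omega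
    rw [this, List.getElem?_eq_getElem hk]
  rw [h1, List.take_add_one, h2]
  rfl

-- main invariant: after k steps, A's chunks equal B's chunks, B's prev is p - 1 for some p ≤ k,
-- and A's open temp_vec is exactly the slice l[p:k]
lemma cc_inv (l : List Int) (k : Nat) (hk : k ≤ l.length) :
    ∃ p : Nat, p ≤ k ∧ (ccB l k).2 = (p : Int) - 1 ∧ (ccA l k).1 = (ccB l k).1 ∧
      (ccA l k).2 = (l.drop p).take (k - p) := by
  induction k with
  | zero =>
    refine ⟨0, le_refl 0, ?_, ?_, ?_⟩ <;> simp [ccA, ccB, PySem.List.pyRange]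
  | succ k ih =>
    obtain ⟨p, hp, hB2, hAB, hA2⟩ := ih (by omega)
    have hkl : k < l.length := by omega
    rw [ccA_succ, ccB_succ]
    by_cases h : PySem.List.pyGetD (l ++ [0]) ((k : Int) + 1) 0 = PySem.List.pyGetD (l ++ [0]) (k : Int) 0 + 1
    · refine ⟨p, by omega, ?_, ?_, ?_⟩ <;> simp only [h, if_pos]
      · exact hB2
      · exact hAB
      · simp only [aug_getD l k hkl, hA2]
        exact take_drop_snoc l p k hp hkl
    · refine ⟨k + 1, le_refl _, ?_, ?_, ?_⟩ <;> simp only [h, if_false]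
      · push_cast; ring
      · have hslice : PySem.List.slice l (some ((ccB l k).2 + 1)) (some ((k : Int) + 1))
            = (l.drop p).take (k + 1 - p) := by
          rw [hB2, show (p : Int) - 1 + 1 = (p : Int) by ring,
              show (k : Int) + 1 = ((k + 1 : Nat) : Int) by push_cast; ring,
              PySem.List.slice_natCast]
        simp only [hslice, hAB, aug_getD l k hkl, hA2, take_drop_snoc l p k hp hkl]
      · simp

-- ===== VERDICT (by name: the statement is the Claim_ definition above) =====
theorem contiguous_chunk_spec : Claim_equal_contiguous_chunk := by
  intro l _
  unfold Spec_contiguous_chunk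
  rw [contiguous_chunk_eq_ccA, contiguous_chunk_alt_eq_ccB]
  obtain ⟨p, _, _, hAB, _⟩ := cc_inv l l.length (le_refl _)
  exact hAB
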